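-- pv_equiv track=rewrite | github.com/joao-luisz/personal-virtual | PersonalVirtual-V1.0/modules/workout_recommendation.py | distribuir_grupos_musculares
-- ===== SOURCE A (Python) =====
-- def distribuir_grupos_musculares(dias_disponiveis):
--     grupos_base = [
--         "Peito + Triceps",
--         "Costas + Biceps",
--         "Quadriceps + Panturrilha",
--         "Posterior de Coxa + Gluteos",
--         "Ombros + Triceps",
--         "Abdomen",
--         "Cardio"
--     ]
--     return [grupos_base[i % len(grupos_base)] for i in range(dias_disponiveis)]
-- ===== SOURCE B (Python) =====
-- def distribuir_grupos_musculares(dias_disponiveis):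
--     grupos_base = [
--         "Peito + Triceps",
--         "Costas + Biceps",
--         "Quadriceps + Panturrilha",
--         "Posterior de Coxa + Gluteos",
--         "Ombros + Triceps",
--         "Abdomen",
--         "Cardio"
--     ]
--     return (grupos_base * (dias_disponiveis // 7 + 1))[:dias_disponiveis]
-- ===== Notes on version B (the rewrite author's own statement) =====
-- stated objective: idiomatic
-- what changed: Replaces the per-element modulo comprehension over range(n) with replicate-and-truncate: the base list is repeated enough whole times in a single list multiplication and then sliced down to the requested length.
import Mathlib
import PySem

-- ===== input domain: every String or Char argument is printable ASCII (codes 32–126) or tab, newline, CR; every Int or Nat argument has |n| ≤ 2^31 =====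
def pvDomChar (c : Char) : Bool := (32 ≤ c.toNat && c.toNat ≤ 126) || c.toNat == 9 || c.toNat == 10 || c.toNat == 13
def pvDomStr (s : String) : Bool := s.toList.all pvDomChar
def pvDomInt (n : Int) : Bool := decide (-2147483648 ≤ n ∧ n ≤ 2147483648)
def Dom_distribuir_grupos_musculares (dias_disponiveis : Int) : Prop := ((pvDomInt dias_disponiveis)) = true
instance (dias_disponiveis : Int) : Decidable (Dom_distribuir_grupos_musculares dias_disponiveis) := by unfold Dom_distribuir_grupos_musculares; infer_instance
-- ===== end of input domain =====

-- B replaces the per-element modulo comprehension with replicate-and-truncate (repeat the base list whole, slice to the requested length); objective: idiomatic.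

-- ===== PORT A =====
-- the literal grupos_base list both Pythons define
def pvGruposBase : List String :=
  ["Peito + Triceps", "Costas + Biceps", "Quadriceps + Panturrilha",
   "Posterior de Coxa + Gluteos", "Ombros + Triceps", "Abdomen", "Cardio"]

-- [grupos_base[i % len(grupos_base)] for i in range(dias_disponiveis)]
def distribuir_grupos_musculares (dias_disponiveis : Int) : List String :=
  (PySem.List.pyRange 0 dias_disponiveis 1).map
    (fun i => PySem.List.pyGetD pvGruposBase (PySem.Int.mod i (pvGruposBase.length : Int)) "")

-- ===== PORT B =====
-- (grupos_base * (dias_disponiveis // 7 + 1))[:dias_disponiveis]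
def distribuir_grupos_musculares_alt (dias_disponiveis : Int) : List String :=
  PySem.List.slice
    ((List.replicate (PySem.Int.floordiv dias_disponiveis 7 + 1).toNat pvGruposBase).flatten)
    none (some dias_disponiveis)

-- ===== PRECONDITION & SPEC =====
def Spec_distribuir_grupos_musculares (dias_disponiveis : Int) (out : List String) : Prop := out = distribuir_grupos_musculares_alt dias_disponiveis
instance (dias_disponiveis : Int) (out : List String) : Decidable (Spec_distribuir_grupos_musculares dias_disponiveis out) := by unfold Spec_distribuir_grupos_musculares; infer_instance

-- ===== CLAIM (what is proved, stated in full; the proofs are below) =====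
def Claim_equal_distribuir_grupos_musculares : Prop := ∀ (dias_disponiveis : Int), Dom_distribuir_grupos_musculares dias_disponiveis → Spec_distribuir_grupos_musculares dias_disponiveis (distribuir_grupos_musculares dias_disponiveis)

-- ===== LEMMAS AND PROOFS =====

-- element i of m copies of g laid end to end is g[i % len g]
lemma flatten_replicate_getElem? (g : List String) (m i : Nat) (h : i < m * g.length) :
    (List.replicate m g).flatten[i]? = g[i % g.length]? := by
  induction m generalizing i with
  | zero => omega
  | succ m ih =>
    have hs : (m + 1) * g.length = m * g.length + g.length := by ring
    simp only [List.replicate_succ, List.flatten_cons]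
    rcases Nat.lt_or_ge i g.length with hi | hi
    · rw [List.getElem?_append_left hi, Nat.mod_eq_of_lt hi]
    · rw [List.getElem?_append_right hi, ih (i - g.length) (by omega),
        Nat.mod_eq_sub_mod hi]

-- the two ports agree on every nonnegative count, stated over Nat
lemma ports_eq_nat (k : Nat) :
    distribuir_grupos_musculares (k : Int) = distribuir_grupos_musculares_alt (k : Int) := by
  have h7 : pvGruposBase.length = 7 := by decide
  unfold distribuir_grupos_musculares distribuir_grupos_musculares_alt
  rw [h7]
  have hfd : PySem.Int.floordiv (k : Int) 7 = ((k / 7 : Nat) : Int) := by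
    rw [PySem.Int.floordiv_eq_ediv_of_pos (by norm_num)]
    exact_mod_cast Int.natCast_div k 7
  rw [hfd]
  have ht : (((k / 7 : Nat) : Int) + 1).toNat = k / 7 + 1 := by omega
  rw [ht, PySem.List.slice_to_natCast, PySem.List.pyRange_zero_nat]
  have hlen : (List.replicate (k / 7 + 1) pvGruposBase).flatten.length = (k / 7 + 1) * 7 := by
    simp [List.length_flatten, h7, Nat.mul_comm]
  have hk : k < (k / 7 + 1) * 7 := by
    have := Nat.mod_lt k (y := 7) (by norm_num)
    have := Nat.div_add_mod k 7
    omega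
  apply List.ext_getElem?
  intro i
  rcases Nat.lt_or_ge i k with hi | hi
  · rw [List.getElem?_take_of_lt hi]
    simp only [List.getElem?_map]
    rw [List.getElem?_range hi, flatten_replicate_getElem? pvGruposBase _ i (by rw [h7]; omega), h7]
    have hlt : i % 7 < pvGruposBase.length := by rw [h7]; exact Nat.mod_lt _ (by norm_num)
    simp only [Option.map_some]
    rw [show ((7 : Nat) : Int) = (7 : Int) from rfl,
      PySem.Int.mod_eq_emod_of_pos (by norm_num),
      show ((i : Int) % 7) = ((i % 7 : Nat) : Int) from by exact_mod_cast Int.natCast_emod i 7]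
    rw [PySem.List.pyGetD_natCast, List.getD_eq_getElem?_getD, List.getElem?_eq_getElem hlt]
    simp only [Option.getD_some]
  · rw [List.getElem?_eq_none (by simpa using hi),
      List.getElem?_eq_none (by simp; omega)]

-- ===== VERDICT (by name: the statement is the Claim_ definition above) =====
theorem distribuir_grupos_musculares_spec : Claim_equal_distribuir_grupos_musculares := by
  intro n _
  unfold Spec_distribuir_grupos_musculares
  by_cases hn : 0 ≤ n
  · have : n = ((n.toNat : Nat) : Int) := by omega
    rw [this]; exact ports_eq_nat n.toNat
  · -- negative count: range is empty and the multiplier n//7+1 is ≤ 0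
    have hA : distribuir_grupos_musculares n = [] := by
      unfold distribuir_grupos_musculares
      rw [PySem.List.pyRange_one_eq_nil (by omega)]; rfl
    have hm : (PySem.Int.floordiv n 7 + 1).toNat = 0 := by
      have hb := PySem.Int.le_floordiv_iff_mul_le (a := n) (b := 7) (q := 0) (by norm_num)
      have : ¬ (0 : Int) ≤ PySem.Int.floordiv n 7 := by
        intro h; have := hb.mp h; omega
      omega
    have hB : distribuir_grupos_musculares_alt n = [] := by
      unfold distribuir_grupos_musculares_alt
      rw [hm]
      simp [PySem.List.slice]
    rw [hA, hB]
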